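-- pv_equiv track=rewrite | github.com/PaoloWang1/Collection-of-Code | binary_pattern.py | check_pattern
-- ===== SOURCE A (Python) =====
-- def check_pattern(number):
--     d = 0
--     if number % 2 == 0:
--         d = 2
--     else:
--         d = 1
--     while d < number:
--         d += d * 2
--         d += d * 2
--         if d == number:
--             return True
--     return False
-- ===== SOURCE B (Python) =====
-- def check_pattern(number):
--     # divide-down: number matches iff number == base * 9**k with k >= 1,
--     # base = 2 for even numbers, 1 for odd ones
--     q = number // 2 if number % 2 == 0 else number
--     if q <= 1:
--         return False
--     while q % 9 == 0:
--         q //= 9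
--     return q == 1
-- ===== Notes on version B (the rewrite author's own statement) =====
-- stated objective: alternative
-- what changed: Replaced A's multiply-up loop (tripling d twice per pass and comparing against number) by a divide-down check: halve even inputs, reject q <= 1, then strip factors of 9 and test whether 1 remains.
import Mathlib
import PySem

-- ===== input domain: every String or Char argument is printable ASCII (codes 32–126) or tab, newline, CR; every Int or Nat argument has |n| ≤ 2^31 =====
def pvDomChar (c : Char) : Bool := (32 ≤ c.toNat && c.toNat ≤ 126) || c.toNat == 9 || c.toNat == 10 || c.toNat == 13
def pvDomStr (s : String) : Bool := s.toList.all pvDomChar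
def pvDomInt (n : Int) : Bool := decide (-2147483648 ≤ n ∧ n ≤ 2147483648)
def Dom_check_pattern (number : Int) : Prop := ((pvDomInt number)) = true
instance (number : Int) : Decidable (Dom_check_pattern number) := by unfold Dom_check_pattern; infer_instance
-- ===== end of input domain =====

-- B replaces A's multiply-up-by-9 search with a divide-down-by-9 check (alternative decomposition, same cost).

-- ===== PORT A =====
-- A's while loop: d += d*2 twice per pass, returning true when d hits number.
-- The extra Prop argument records that d stays positive (true in A, where d starts at 1 or 2);
-- it only serves termination and does not change the computation.
def pvLoopA (number d : Int) (hd : 0 < d) : Bool :=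
  if h : d < number then
    if ((d + d * 2) + (d + d * 2) * 2) = number then true
    else pvLoopA number ((d + d * 2) + (d + d * 2) * 2) (by omega)
  else false
termination_by (number - d).toNat
decreasing_by omega

def check_pattern (number : Int) : Bool :=
  if PySem.Int.mod number 2 = 0 then pvLoopA number 2 (by omega)
  else pvLoopA number 1 (by omega)

-- ===== PORT B =====
-- B's while loop: strip factors of 9; the Prop argument (0 < q) serves termination only.
def pvLoopB (q : Int) (hq : 0 < q) : Bool :=
  if h : PySem.Int.mod q 9 = 0 then
    pvLoopB (PySem.Int.floordiv q 9)
      (by rw [PySem.Int.mod_eq_emod_of_pos (by norm_num)] at h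
          rw [PySem.Int.floordiv_eq_ediv_of_pos (by norm_num)]; omega)
  else q == 1
termination_by q.toNat
decreasing_by
  rw [PySem.Int.mod_eq_emod_of_pos (by norm_num)] at h
  rw [PySem.Int.floordiv_eq_ediv_of_pos (by norm_num)]; omega

def check_pattern_alt (number : Int) : Bool :=
  let q := if PySem.Int.mod number 2 = 0 then PySem.Int.floordiv number 2 else number
  if h : q ≤ 1 then false
  else pvLoopB q (by omega)

-- ===== PRECONDITION & SPEC =====
def Spec_check_pattern (number : Int) (out : Bool) : Prop := out = check_pattern_alt number
instance (number : Int) (out : Bool) : Decidable (Spec_check_pattern number out) := by unfold Spec_check_pattern; infer_instance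

-- ===== CLAIM (what is proved, stated in full; the proofs are below) =====
def Claim_equal_check_pattern : Prop := ∀ (number : Int), Dom_check_pattern number → Spec_check_pattern number (check_pattern number)

-- ===== LEMMAS AND PROOFS =====

-- proof-irrelevance congruence helpers for the two loops
theorem pvLoopA_congr (n1 n2 d1 d2 : Int) (h1 : 0 < d1) (h2 : 0 < d2)
    (hn : n1 = n2) (hd : d1 = d2) : pvLoopA n1 d1 h1 = pvLoopA n2 d2 h2 := by
  subst hn; subst hd; rfl

theorem pvLoopB_congr (a b : Int) (ha : 0 < a) (hb : 0 < b) (h : a = b) :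
    pvLoopB a ha = pvLoopB b hb := by
  subst h; rfl

-- A's loop returns false when number is not d times a positive power of 9.
theorem pvLoopA_false : ∀ (n : Nat) (number d : Int) (hd : 0 < d), (number - d).toNat ≤ n →
    (∀ k : Nat, 1 ≤ k → number ≠ d * 9 ^ k) → pvLoopA number d hd = false := by
  intro n
  induction n with
  | zero =>
      intro number d hd hle h
      rw [pvLoopA, dif_neg (by omega)]
  | succ n ih =>
      intro number d hd hle h
      rw [pvLoopA]
      split
      · next hlt =>
          rw [if_neg (by have := h 1 (by omega); simp only [pow_one] at this; omega)]
          exact ih number _ (by omega) (by omega) (by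
            intro k hk heq
            exact h (k + 1) (by omega) (by rw [heq]; ring))
      · rfl

-- the bridge: A's loop starting at d over number = d*q equals B's loop on q (q > 1).
theorem pvBridge : ∀ (n : Nat) (d q : Int) (hd : 0 < d) (hq1 : 1 < q) (hq : 0 < q),
    q.toNat ≤ n → pvLoopA (d * q) d hd = pvLoopB q hq := by
  intro n
  induction n with
  | zero => intro d q hd hq1 hq hle; omega
  | succ n ih =>
      intro d q hd hq1 hq hle
      have hdlt : d < d * q := by nlinarith
      rw [pvLoopA, dif_pos hdlt, pvLoopB]
      have hfd : PySem.Int.floordiv q 9 = q / 9 :=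
        PySem.Int.floordiv_eq_ediv_of_pos (by norm_num)
      by_cases h9 : PySem.Int.mod q 9 = 0
      · rw [dif_pos h9]
        rw [PySem.Int.mod_eq_emod_of_pos (by norm_num)] at h9
        by_cases hq9 : q = 9
        · subst hq9
          rw [if_pos (by ring)]
          rw [pvLoopB_congr (PySem.Int.floordiv 9 9) 1 (by rw [hfd]; omega) (by omega)
                (by rw [hfd]; norm_num)]
          rw [pvLoopB]
          rw [dif_neg (by rw [PySem.Int.mod_eq_emod_of_pos (by norm_num)]; omega)]
          decide
        · rw [if_neg (by
            intro hc
            have h9d : d * 9 = d * q := by linarith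
            have : (9 : Int) = q := mul_left_cancel₀ (by omega) h9d
            omega)]
          have hq' : 1 < q / 9 := by omega
          have heq : d * q = ((d + d * 2) + (d + d * 2) * 2) * (q / 9) := by
            have h99 : 9 * (q / 9) = q := by omega
            have : ((d + d * 2) + (d + d * 2) * 2) * (q / 9) = d * (9 * (q / 9)) := by ring
            rw [this, h99]
          rw [pvLoopB_congr (PySem.Int.floordiv q 9) (q / 9) (by rw [hfd]; omega)
                (by omega) hfd]
          rw [pvLoopA_congr (d * q) (((d + d * 2) + (d + d * 2) * 2) * (q / 9)) _ _
                (by omega) (by omega) heq rfl]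
          exact ih _ (q / 9) (by omega) hq' (by omega) (by omega)
      · rw [dif_neg h9]
        rw [PySem.Int.mod_eq_emod_of_pos (by norm_num)] at h9
        rw [if_neg (by
          intro hc
          have h9d : d * 9 = d * q := by linarith
          have : (9 : Int) = q := mul_left_cancel₀ (by omega) h9d
          omega)]
        have hne : (q == 1) = false := by simp only [beq_eq_false_iff_ne, ne_eq]; omega
        rw [hne]
        apply pvLoopA_false ((d * q - ((d + d * 2) + (d + d * 2) * 2)).toNat)
        · omega
        · intro k hk heq
          have h9k : ((d + d * 2) + (d + d * 2) * 2) * 9 ^ k = d * 9 ^ (k + 1) := by ring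
          rw [h9k] at heq
          have hpow : q = 9 ^ (k + 1) := mul_left_cancel₀ (by omega) heq
          have hdvd : (9 : Int) ∣ 9 ^ (k + 1) := dvd_pow_self 9 (by omega)
          rw [← hpow] at hdvd
          omega

theorem pvMain (number : Int) : check_pattern number = check_pattern_alt number := by
  unfold check_pattern check_pattern_alt
  have hfd : PySem.Int.floordiv number 2 = number / 2 :=
    PySem.Int.floordiv_eq_ediv_of_pos (by norm_num)
  by_cases hm : PySem.Int.mod number 2 = 0
  · rw [if_pos hm]
    simp only [hm, if_pos]
    rw [PySem.Int.mod_eq_emod_of_pos (by norm_num)] at hm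
    by_cases hle : PySem.Int.floordiv number 2 ≤ 1
    · rw [dif_pos hle, pvLoopA, dif_neg (by rw [hfd] at hle; omega)]
    · rw [dif_neg hle]
      rw [hfd] at hle
      rw [pvLoopB_congr (PySem.Int.floordiv number 2) (number / 2) (by rw [hfd]; omega)
            (by omega) hfd]
      rw [pvLoopA_congr number (2 * (number / 2)) 2 2 (by omega) (by omega)
            (by omega) rfl]
      exact pvBridge (number / 2).toNat 2 (number / 2) (by omega) (by omega) (by omega)
        (by omega)
  · rw [if_neg hm]
    simp only [hm, ite_false]
    rw [PySem.Int.mod_eq_emod_of_pos (by norm_num)] at hm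
    by_cases hle : number ≤ 1
    · rw [dif_pos hle, pvLoopA, dif_neg (by omega)]
    · rw [dif_neg hle]
      rw [pvLoopA_congr number (1 * number) 1 1 (by omega) (by omega) (by ring) rfl]
      exact pvBridge number.toNat 1 number (by omega) (by omega) (by omega) (by omega)

-- ===== VERDICT (by name: the statement is the Claim_ definition above) =====
theorem check_pattern_spec : Claim_equal_check_pattern := by
  intro number _
  exact pvMain number
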